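-- pv_equiv track=rewrite | github.com/bobxiong88/Competitive-Programming-Solutions | DMOJ solutions/CCC/ccc07s3.py | findFriend
-- ===== SOURCE A (Python) =====
-- def findFriend(graph,ox, x, y, visited):
--     nodeVal = graph[x]
--     visited.append(nodeVal)
--
--     if nodeVal==-1:
--         pass
--     elif ox == nodeVal:
--         pass
--     else:
--         findFriend(graph,ox,nodeVal,y,visited)
--     return visited
-- ===== SOURCE B (Python) =====
-- def findFriend(graph, ox, x, y, visited):
--     # Bounded iteration instead of recursion: a terminating chain looks up each
--     # key at most once, so len(graph) + 1 iterations always suffice; the bound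
--     # doubles as a cycle guard (no recursion depth blow-up on cyclic data).
--     cur, done = x, False
--     for _ in range(len(graph) + 1):
--         if not done:
--             cur = graph[cur]
--             visited.append(cur)
--             done = cur == -1 or ox == cur
--     return visited
-- ===== Notes on version B (the rewrite author's own statement) =====
-- stated objective: alternative
-- what changed: Replaces the unbounded recursion threading the mutable accumulator by a bounded for-loop (len(graph)+1 iterations, justified by pigeonhole) with a done flag, appending values iteratively.
import Mathlib
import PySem

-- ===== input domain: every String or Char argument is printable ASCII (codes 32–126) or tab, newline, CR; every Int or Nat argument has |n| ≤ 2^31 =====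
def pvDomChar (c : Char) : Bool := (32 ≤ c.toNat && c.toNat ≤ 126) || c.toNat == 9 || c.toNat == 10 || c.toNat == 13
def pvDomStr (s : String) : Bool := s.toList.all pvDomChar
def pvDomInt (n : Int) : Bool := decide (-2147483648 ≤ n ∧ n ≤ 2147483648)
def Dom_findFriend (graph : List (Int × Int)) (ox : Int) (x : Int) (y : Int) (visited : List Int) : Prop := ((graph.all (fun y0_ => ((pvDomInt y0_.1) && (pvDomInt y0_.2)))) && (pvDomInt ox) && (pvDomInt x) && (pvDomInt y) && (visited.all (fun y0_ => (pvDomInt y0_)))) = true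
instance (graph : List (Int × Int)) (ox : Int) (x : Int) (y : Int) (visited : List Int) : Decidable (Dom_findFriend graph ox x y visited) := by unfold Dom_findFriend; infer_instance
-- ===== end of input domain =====

-- B replaces A's unbounded accumulator recursion by a bounded for-loop over
-- range(len(graph)+1) with a done flag (pigeonhole: a terminating chain needs at
-- most len(graph) lookups). Equivalence is about the RETURN value; both Pythons
-- mutate `visited` to the same final contents on every input Pre_ admits.

-- ===== PORT A =====
-- Python dict lookup graph[x] (first match on the association list); none = KeyError.
def pyLookup (graph : List (Int × Int)) (k : Int) : Option Int :=
  (graph.find? (fun p => p.1 == k)).map (·.2)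

-- A's recursion, with fuel (graph.length + 1 suffices on every input Pre_ admits;
-- fuel exhaustion / missing key return the current visited, both outside Pre_).
def findFriendGo (graph : List (Int × Int)) (ox : Int) (y : Int) : Nat → Int → List Int → List Int
  | 0, _, visited => visited
  | Nat.succ n, x, visited =>
    match pyLookup graph x with
    | none => visited
    | some nodeVal =>
      let visited := visited ++ [nodeVal]
      if nodeVal = -1 then visited
      else if ox = nodeVal then visited
      else findFriendGo graph ox y n nodeVal visited

def findFriend (graph : List (Int × Int)) (ox : Int) (x : Int) (y : Int) (visited : List Int) : List Int :=
  findFriendGo graph ox y (graph.length + 1) x visited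

-- ===== PORT B =====
-- one iteration of Source B's for-loop body; state = (cur, done, visited).
-- On a missing key Python raises KeyError (outside Pre_); the port stops there.
def stepB (graph : List (Int × Int)) (ox : Int) (st : Int × Bool × List Int) (_i : Nat) : Int × Bool × List Int :=
  if st.2.1 then st
  else
    match pyLookup graph st.1 with
    | none => (st.1, true, st.2.2)
    | some cur => (cur, (cur == -1) || (ox == cur), st.2.2 ++ [cur])

def findFriend_alt (graph : List (Int × Int)) (ox : Int) (x : Int) (y : Int) (visited : List Int) : List Int :=
  ((List.range (graph.length + 1)).foldl (stepB graph ox) (x, false, visited)).2.2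

-- ===== PRECONDITION & SPEC =====
-- Pre_ excludes exactly the inputs where Python A raises: a chain step whose key is absent
-- from graph (KeyError) or a chain that cycles without hitting -1 or ox (RecursionError).
-- stopsWithin iterates only the input's pointer function; by pigeonhole a terminating chain
-- stops within graph.length + 1 steps, so this admits every input A returns on.
def stopsWithin (graph : List (Int × Int)) (ox : Int) : Nat → Int → Bool
  | 0, _ => false
  | Nat.succ n, x =>
    match pyLookup graph x with
    | none => false
    | some v => if v = -1 ∨ ox = v then true else stopsWithin graph ox n v

def Pre_findFriend (graph : List (Int × Int)) (ox : Int) (x : Int) (y : Int) (visited : List Int) : Prop :=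
  stopsWithin graph ox (graph.length + 1) x = true

instance (graph : List (Int × Int)) (ox : Int) (x : Int) (y : Int) (visited : List Int) : Decidable (Pre_findFriend graph ox x y visited) := by unfold Pre_findFriend; infer_instance

def pvWitness_findFriend : (List (Int × Int)) × Int × Int × Int × List Int :=
  ([(1, 2), (2, -1)], 5, 1, 0, [7])

def Spec_findFriend (graph : List (Int × Int)) (ox : Int) (x : Int) (y : Int) (visited : List Int) (out : List Int) : Prop := out = findFriend_alt graph ox x y visited
instance (graph : List (Int × Int)) (ox : Int) (x : Int) (y : Int) (visited : List Int) (out : List Int) : Decidable (Spec_findFriend graph ox x y visited out) := by unfold Spec_findFriend; infer_instance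

-- ===== CLAIM (what is proved, stated in full; the proofs are below) =====
def Claim_equal_findFriend : Prop := ∀ (graph : List (Int × Int)) (ox : Int) (x : Int) (y : Int) (visited : List Int), Dom_findFriend graph ox x y visited → Pre_findFriend graph ox x y visited → Spec_findFriend graph ox x y visited (findFriend graph ox x y visited)

-- ===== LEMMAS AND PROOFS =====
-- once the done flag is set, the remaining iterations leave the state unchanged
theorem foldl_stepB_done (graph : List (Int × Int)) (ox : Int) :
    ∀ (l : List Nat) (st : Int × Bool × List Int), st.2.1 = true →
      l.foldl (stepB graph ox) st = st := by
  intro l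
  induction l with
  | nil => intro st _; rfl
  | cons a l ih =>
    intro st h
    simp only [List.foldl_cons, stepB, h, if_true]
    exact ih st h

-- B's fold equals A's fuel recursion (fuel = loop length), on ALL inputs
theorem foldl_stepB_eq_go (graph : List (Int × Int)) (ox y : Int) :
    ∀ (l : List Nat) (x : Int) (visited : List Int),
      (l.foldl (stepB graph ox) (x, false, visited)).2.2
        = findFriendGo graph ox y l.length x visited := by
  intro l
  induction l with
  | nil => intro x visited; simp [findFriendGo]
  | cons a l ih =>
    intro x visited
    simp only [List.foldl_cons, List.length_cons, findFriendGo]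
    cases h : pyLookup graph x with
    | none =>
      simp only [stepB, h, Bool.false_eq_true, if_false]
      rw [foldl_stepB_done graph ox l _ rfl]
    | some v =>
      simp only [stepB, h, Bool.false_eq_true, if_false]
      by_cases h1 : v = -1
      · simp only [h1, if_true]
        rw [foldl_stepB_done graph ox l _ (by simp)]
      · by_cases h2 : ox = v
        · have hd : ((v == -1) || (ox == v)) = true := by simp [h2]
          rw [hd, foldl_stepB_done graph ox l _ rfl]
          simp [h1, h2]
        · have : ((v == -1) || (ox == v)) = false := by
            simp [h1, h2]
          simp only [h1, h2, if_false, this]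
          exact ih v (visited ++ [v])

-- ===== VERDICT (by name: the statement is the Claim_ definition above) =====
theorem findFriend_spec : Claim_equal_findFriend := by
  intro graph ox x y visited _ _
  unfold Spec_findFriend findFriend findFriend_alt
  rw [foldl_stepB_eq_go graph ox y (List.range (graph.length + 1)) x visited,
    List.length_range]
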